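-- pv_equiv track=rewrite | github.com/2dend0713/TIL | Algorithm/problem_solving/baekjoon/codes-without-explanation/1018_체스판-다시-칠하기.py | count
-- ===== SOURCE A (Python) =====
-- def count(line, color, other_color):
--     cnt = 0
--     for idx, cell in enumerate(line):
--         if idx % 2 == 0 and not cell == color:
--             cnt += 1
--         elif idx % 2 == 1 and not cell == other_color:
--             cnt += 1
--     return cnt
-- ===== SOURCE B (Python) =====
-- def count(line, color, other_color):
--     return sum(c != color for c in line[::2]) + sum(c != other_color for c in line[1::2])
-- ===== Notes on version B (the rewrite author's own statement) =====
-- stated objective: alternative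
-- what changed: Replaces the single enumerate loop with an idx % 2 branch by two homogeneous strided passes: count mismatches against color over line[::2] and against other_color over line[1::2], summing the two counts.
import Mathlib
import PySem

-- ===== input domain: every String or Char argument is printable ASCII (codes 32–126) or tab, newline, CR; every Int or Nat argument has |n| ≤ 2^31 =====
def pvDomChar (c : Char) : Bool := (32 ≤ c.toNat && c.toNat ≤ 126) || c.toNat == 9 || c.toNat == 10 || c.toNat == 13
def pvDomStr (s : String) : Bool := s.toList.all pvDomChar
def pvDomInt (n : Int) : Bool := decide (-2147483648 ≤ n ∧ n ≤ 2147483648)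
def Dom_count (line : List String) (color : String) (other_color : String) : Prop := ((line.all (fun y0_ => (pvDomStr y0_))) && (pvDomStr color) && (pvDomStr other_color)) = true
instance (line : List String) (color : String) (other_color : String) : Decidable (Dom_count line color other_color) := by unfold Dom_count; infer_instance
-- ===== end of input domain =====

-- B replaces A's single enumerate-loop with an idx%2 branch by two homogeneous strided
-- passes (line[::2] vs color, line[1::2] vs other_color) summed; objective: alternative.


-- ===== PORT A =====
def count (line : List String) (color : String) (other_color : String) : Int :=
  (PySem.List.enumerate line 0).foldl
    (fun cnt p =>
      if PySem.Int.mod p.1 2 = 0 ∧ ¬ (p.2 = color) then cnt + 1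
      else if PySem.Int.mod p.1 2 = 1 ∧ ¬ (p.2 = other_color) then cnt + 1
      else cnt) 0

-- ===== PORT B =====
-- line[::2] and line[1::2] are PySem.List.slice?; step 2 ≠ 0 so the result is always
-- `some _` and `.getD []` only removes the option (exact).
def count_alt (line : List String) (color : String) (other_color : String) : Int :=
  (((PySem.List.slice? line none none 2).getD []).countP (fun c => !(c == color)) : Int)
  + (((PySem.List.slice? line (some 1) none 2).getD []).countP (fun c => !(c == other_color)) : Int)

-- ===== PRECONDITION & SPEC =====
def Spec_count (line : List String) (color : String) (other_color : String) (out : Int) : Prop := out = count_alt line color other_color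
instance (line : List String) (color : String) (other_color : String) (out : Int) : Decidable (Spec_count line color other_color out) := by unfold Spec_count; infer_instance

-- ===== CLAIM (what is proved, stated in full; the proofs are below) =====
def Claim_equal_count : Prop := ∀ (line : List String) (color : String) (other_color : String), Dom_count line color other_color → Spec_count line color other_color (count line color other_color)

-- ===== LEMMAS AND PROOFS =====

-- elements at even positions / at odd positions, in one structural pass
def pvSplit {α : Type} : List α → List α × List α
  | [] => ([], [])
  | x :: xs => (x :: (pvSplit xs).2, (pvSplit xs).1)

-- two-at-a-time induction skeleton
def pvPairs {α : Type} : List α → Nat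
  | [] => 0
  | [_] => 0
  | _ :: _ :: xs => pvPairs xs + 1

-- A's loop, with an arbitrary (Nat) start index and accumulator
lemma pv_foldCount (color other_color : String) :
    ∀ (xs : List String) (j : Nat) (acc : Int),
      (PySem.List.enumerate xs (j : Int)).foldl
        (fun cnt p =>
          if PySem.Int.mod p.1 2 = 0 ∧ ¬ (p.2 = color) then cnt + 1
          else if PySem.Int.mod p.1 2 = 1 ∧ ¬ (p.2 = other_color) then cnt + 1
          else cnt) acc
      = acc + (if j % 2 = 0
          then ((pvSplit xs).1.countP (fun c => !(c == color)) : Int)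
             + ((pvSplit xs).2.countP (fun c => !(c == other_color)) : Int)
          else ((pvSplit xs).1.countP (fun c => !(c == other_color)) : Int)
             + ((pvSplit xs).2.countP (fun c => !(c == color)) : Int)) := by
  intro xs
  induction xs with
  | nil => intro j acc; simp [PySem.List.enumerate_nil, pvSplit]
  | cons x xs ih =>
    intro j acc
    rw [PySem.List.enumerate_cons]
    have hcast : ((j : Int) + 1) = ((j + 1 : Nat) : Int) := by push_cast; ring
    rw [List.foldl_cons, hcast, ih]
    have hm : PySem.Int.mod (j : Int) 2 = ((j % 2 : Nat) : Int) := by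
      exact_mod_cast PySem.Int.mod_natCast j 2
    simp only [pvSplit, List.countP_cons, hm]
    rcases Nat.even_or_odd j with hj | hj
    · have h0 : j % 2 = 0 := Nat.even_iff.mp hj
      have h1 : (j+1) % 2 = 1 := by omega
      by_cases hx : x = color
      · simp [h0, h1, hx]; ring
      · simp [h0, h1, hx]; ring
    · have h0 : j % 2 = 1 := Nat.odd_iff.mp hj
      have h1 : (j+1) % 2 = 0 := by omega
      by_cases hx : x = other_color
      · simp [h0, h1, hx]; ring
      · simp [h0, h1, hx]; ring

-- the filterMap core of slice? with stride 2, in Nat form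
lemma pv_FMnat {α : Type} : ∀ xs : List α,
    List.filterMap (fun k : Nat => xs[2*k]?) (List.range ((xs.length+1)/2)) = (pvSplit xs).1 := by
  intro xs
  induction xs using pvPairs.induct with
  | case1 => simp [pvSplit]
  | case2 x => simp [pvSplit, List.range_succ]
  | case3 x y rest ih =>
    have hlen : ((x :: y :: rest).length + 1) / 2 = (rest.length + 1) / 2 + 1 := by
      simp [List.length_cons]; omega
    rw [hlen, List.range_succ_eq_map, List.filterMap_cons, List.filterMap_map]
    have hf : ((fun k : Nat => (x :: y :: rest)[2*k]?) ∘ Nat.succ) = fun k : Nat => rest[2*k]? := by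
      funext k
      have : 2 * Nat.succ k = (2*k) + 1 + 1 := by omega
      simp [Function.comp, this]
    simp only [hf, ih]
    simp [pvSplit]

-- line[::2] is the even-position sublist
lemma pv_sliceEven {α : Type} (xs : List α) :
    PySem.List.slice? xs none none 2 = some (pvSplit xs).1 := by
  simp only [PySem.List.slice?, PySem.List.sliceIndices]
  norm_num
  rw [show (if 0 < xs.length then (((xs.length : Int) + 2 - 1) / 2).toNat else 0)
        = (xs.length + 1)/2 from by split_ifs <;> omega]
  rw [← pv_FMnat xs]
  apply List.filterMap_congr
  intro k _
  rw [show ((2 * (k : Int)).toNat) = 2*k from by omega]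

-- line[1::2] is the odd-position sublist
lemma pv_sliceOdd {α : Type} (xs : List α) :
    PySem.List.slice? xs (some 1) none 2 = some (pvSplit xs).2 := by
  cases xs with
  | nil => rfl
  | cons x t =>
    simp only [PySem.List.slice?, PySem.List.sliceIndices]
    norm_num
    have h2 : (pvSplit (x :: t)).2 = (pvSplit t).1 := rfl
    rw [h2, ← pv_FMnat t]
    rw [show (if 0 < t.length then (((t.length : Int) + 2 - 1) / 2).toNat else 0)
          = (t.length + 1)/2 from by split_ifs <;> omega]
    apply List.filterMap_congr
    intro k _
    rw [show ((1 + 2 * (k : Int)).toNat) = 2*k + 1 from by omega]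
    simp

-- ===== VERDICT (by name: the statement is the Claim_ definition above) =====
theorem count_spec : Claim_equal_count := by
  intro line color other_color _
  unfold Spec_count count count_alt
  rw [pv_sliceEven, pv_sliceOdd]
  have h := pv_foldCount color other_color line 0 0
  simpa using h
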